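-- pv_equiv track=rewrite | github.com/HealeyLab/py_routines | waveform_avg_by_cluster.py | LoadChan
-- ===== SOURCE A (Python) =====
-- def LoadChan(arry):
--     """takes an array from a continuous file in Rhythm_FPGA directory, sets it up
--     as a dict of channels"""
--     """to setup the flat binary as a dictionary of 32 channels"""
--     channels = {}
--     for j in range(32):
--         channels['ch' + str(j)] = []
--         for i in range(j, len(arry), 32):
--             channels['ch' + str(j)].append(arry[i])
--
--     return channels
-- ===== SOURCE B (Python) =====
-- def LoadChan(arry):
--     """takes an array from a continuous file in Rhythm_FPGA directory, sets it up
--     as a dict of channels"""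
--     channels = {'ch' + str(j): [] for j in range(32)}
--     for i, v in enumerate(arry):
--         channels['ch' + str(i % 32)].append(v)
--     return channels
-- ===== Notes on version B (the rewrite author's own statement) =====
-- stated objective: alternative
-- what changed: Replaces A's 32 outer strided passes over the input (one per channel) with a dict-comprehension initialization of all 32 keys followed by a single enumerate pass that routes each element to channel i % 32.
import Mathlib
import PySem

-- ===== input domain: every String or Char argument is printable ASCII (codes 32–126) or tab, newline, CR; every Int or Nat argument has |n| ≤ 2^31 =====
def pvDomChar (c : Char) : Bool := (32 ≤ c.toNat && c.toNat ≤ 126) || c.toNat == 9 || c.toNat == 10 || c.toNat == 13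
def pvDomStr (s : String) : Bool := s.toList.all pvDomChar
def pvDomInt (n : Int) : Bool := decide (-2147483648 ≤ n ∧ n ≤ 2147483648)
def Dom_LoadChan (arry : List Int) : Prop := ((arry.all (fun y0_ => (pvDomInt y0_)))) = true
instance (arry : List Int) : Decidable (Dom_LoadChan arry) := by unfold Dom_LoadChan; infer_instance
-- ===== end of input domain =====

-- B replaces A's 32 strided passes with one enumerate pass routing each element to channel i % 32 (alternative decomposition, same cost).


-- ===== PORT A =====
-- arry[i] is ported as pyGetD arry i 0: every index i drawn from range(j, len(arry), 32) is in range, so the default is never used.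
def LoadChan (arry : List Int) : List (String × List Int) :=
  ((PySem.List.pyRange 0 32 1).foldl
    (fun channels j =>
      (PySem.List.pyRange j (PySem.List.len arry) 32).foldl
        (fun channels i =>
          channels.modify ("ch" ++ PySem.Int.toStr j) [] (fun l => l ++ [PySem.List.pyGetD arry i 0]))
        (channels.insert ("ch" ++ PySem.Int.toStr j) []))
    PySem.Dict.empty).items

-- ===== PORT B =====
def LoadChan_alt (arry : List Int) : List (String × List Int) :=
  let channels := (PySem.List.pyRange 0 32 1).foldl
    (fun d j => d.insert ("ch" ++ PySem.Int.toStr j) []) PySem.Dict.empty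
  ((PySem.List.enumerate arry).foldl
    (fun d p => d.modify ("ch" ++ PySem.Int.toStr (PySem.Int.mod p.1 32)) [] (fun l => l ++ [p.2]))
    channels).items

-- ===== PRECONDITION & SPEC =====
def Spec_LoadChan (arry : List Int) (out : List (String × List Int)) : Prop := out = LoadChan_alt arry
instance (arry : List Int) (out : List (String × List Int)) : Decidable (Spec_LoadChan arry out) := by unfold Spec_LoadChan; infer_instance

-- ===== CLAIM (what is proved, stated in full; the proofs are below) =====
def Claim_equal_LoadChan : Prop := ∀ (arry : List Int), Dom_LoadChan arry → Spec_LoadChan arry (LoadChan arry)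

-- ===== LEMMAS AND PROOFS =====

-- the channel-key function
def pvKey (j : Int) : String := "ch" ++ PySem.Int.toStr j

lemma pvMem32 {m : Int} (h0 : 0 ≤ m) (h1 : m < 32) : m ∈ PySem.List.pyRange 0 32 1 := by
  rw [PySem.List.mem_pyRange_iff_of_pos (by norm_num)]
  exact ⟨h0, h1, one_dvd _⟩

-- key equality on [0,32) is index equality (checked on the 32 literal keys)
lemma pvKey_inj {m j : Int} (hm0 : 0 ≤ m) (hm1 : m < 32) (hj0 : 0 ≤ j) (hj1 : j < 32) :
    (pvKey m == pvKey j) = decide (m = j) := by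
  have h : ∀ a ∈ PySem.List.pyRange 0 32 1, ∀ b ∈ PySem.List.pyRange 0 32 1,
      (pvKey a == pvKey b) = decide (a = b) := by decide
  exact h m (pvMem32 hm0 hm1) j (pvMem32 hj0 hj1)

lemma pvRange_pairwise {a b s : Int} (hs : 0 < s) :
    (PySem.List.pyRange a b s).Pairwise (· < ·) := by
  rw [PySem.List.pyRange_of_pos a b hs]
  refine List.Pairwise.map _ ?_ (List.pairwise_lt_range)
  intro k k' hk
  have : s * (k : Int) < s * (k' : Int) :=
    Int.mul_lt_mul_of_pos_left (by exact_mod_cast hk) hs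
  omega

-- the core routing fact: indices congruent to j mod 32 are exactly the stride-32 range from j
lemma pvFilter_range_mod {j : Int} (hj0 : 0 ≤ j) (hj1 : j < 32) (n : Int) :
    (PySem.List.pyRange 0 n 1).filter (fun i => decide (PySem.Int.mod i 32 = j))
      = PySem.List.pyRange j n 32 := by
  have h32 : (0:Int) < 32 := by norm_num
  have hnd1 : ((PySem.List.pyRange 0 n 1).filter (fun i => decide (PySem.Int.mod i 32 = j))).Nodup :=
    ((pvRange_pairwise (s := 1) (by norm_num)).sublist List.filter_sublist).imp ne_of_lt
  have hnd2 : (PySem.List.pyRange j n 32).Nodup := (pvRange_pairwise h32).imp ne_of_lt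
  have hperm : ((PySem.List.pyRange 0 n 1).filter
      (fun i => decide (PySem.Int.mod i 32 = j))).Perm (PySem.List.pyRange j n 32) := by
    rw [List.perm_ext_iff_of_nodup hnd1 hnd2]
    intro x
    simp only [List.mem_filter, PySem.List.mem_pyRange_iff_of_pos (by norm_num : (0:Int) < 1),
      PySem.List.mem_pyRange_iff_of_pos h32, decide_eq_true_eq,
      PySem.Int.mod_eq_emod_of_pos h32]
    omega
  exact List.Perm.eq_of_pairwise (fun a b _ _ hab hba => le_antisymm hab hba)
    (((pvRange_pairwise (s := 1) (by norm_num)).sublist List.filter_sublist).imp le_of_lt)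
    ((pvRange_pairwise h32).imp le_of_lt) hperm

-- appending values one at a time at a fixed key is a single insert
lemma pvFoldl_modify_fixed {k : String} (is : List Int) (valf : Int → Int)
    (d : PySem.Dict String (List Int)) (acc : List Int) :
    is.foldl (fun d i => d.modify k [] (fun l => l ++ [valf i])) (d.insert k acc)
      = d.insert k (acc ++ is.map valf) := by
  induction is generalizing acc with
  | nil => simp
  | cons i is ih =>
    simp only [List.foldl_cons]
    have h1 : (d.insert k acc).modify k [] (fun l => l ++ [valf i]) = d.insert k (acc ++ [valf i]) := by
      simp [PySem.Dict.modify, PySem.Dict.getD_insert_self, PySem.Dict.insert_insert_self]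
    rw [h1, ih]
    simp

-- a Set.update by elements already present is the identity
lemma pvSet_update_of_subset {s : PySem.Set String} {l : List String}
    (h : ∀ x ∈ l, x ∈ s) : PySem.Set.update s l = s := by
  induction l generalizing s with
  | nil => rfl
  | cons x l ih =>
    have hx : PySem.Set.add s x = s := by
      have hxs : x ∈ s := h x (by simp)
      simp [PySem.Set.add, PySem.Set.contains, hxs]
    show PySem.Set.update (PySem.Set.add s x) l = s
    rw [hx]
    exact ih (fun y hy => h y (by simp [hy]))

lemma pvStride (arry : List Int) {j : Int} (hj0 : 0 ≤ j) (hj1 : j < 32) :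
    ((PySem.List.enumerate arry).filter
        (fun p => pvKey (PySem.Int.mod p.1 32) == pvKey j)).map (fun p => p.2)
      = (PySem.List.pyRange j (PySem.List.len arry) 32).map
          (fun i => PySem.List.pyGetD arry i 0) := by
  have h32 : (0:Int) < 32 := by norm_num
  rw [PySem.List.enumerate_eq_map_pyRange arry 0, List.filter_map, List.map_map]
  have hcong : ∀ i ∈ PySem.List.pyRange 0 (PySem.List.len arry) 1,
      ((fun p : Int × Int => pvKey (PySem.Int.mod p.1 32) == pvKey j) ∘
        fun j_1 => (j_1, PySem.List.pyGetD arry j_1 0)) i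
        = decide (PySem.Int.mod i 32 = j) := by
    intro i _
    exact pvKey_inj (PySem.Int.mod_nonneg i h32) (PySem.Int.mod_lt i h32) hj0 hj1
  rw [List.filter_congr hcong, pvFilter_range_mod hj0 hj1 _]
  rfl

-- ===== VERDICT (by name: the statement is the Claim_ definition above) =====
theorem LoadChan_spec : Claim_equal_LoadChan := by
  intro arry _
  show LoadChan arry = LoadChan_alt arry
  have h32 : (0:Int) < 32 := by norm_num
  have hnodup : ((PySem.List.pyRange 0 32 1).map (fun j => "ch" ++ PySem.Int.toStr j)).Nodup := by
    decide
  have hfresh : ∀ j ∈ PySem.List.pyRange 0 32 1,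
      (PySem.Dict.empty : PySem.Dict String (List Int)).contains ("ch" ++ PySem.Int.toStr j) = false := by
    intro j _
    simp [PySem.Dict.contains_empty]
  have hbounds : ∀ j ∈ PySem.List.pyRange 0 32 1, 0 ≤ j ∧ j < 32 := by
    intro j hj
    rw [PySem.List.mem_pyRange_iff_of_pos (by norm_num)] at hj
    exact ⟨hj.1, hj.2.1⟩
  -- ---- A's side: each outer iteration is a single insert of the stride-32 slice ----
  have hstep : ∀ (d : PySem.Dict String (List Int)) (j : Int),
      (PySem.List.pyRange j (PySem.List.len arry) 32).foldl
        (fun channels i =>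
          channels.modify ("ch" ++ PySem.Int.toStr j) [] (fun l => l ++ [PySem.List.pyGetD arry i 0]))
        (d.insert ("ch" ++ PySem.Int.toStr j) [])
      = d.insert ("ch" ++ PySem.Int.toStr j)
          ((PySem.List.pyRange j (PySem.List.len arry) 32).map (fun i => PySem.List.pyGetD arry i 0)) := by
    intro d j
    rw [pvFoldl_modify_fixed (PySem.List.pyRange j (PySem.List.len arry) 32)
      (fun i => PySem.List.pyGetD arry i 0) d []]
    simp
  have hA : LoadChan arry = (PySem.List.pyRange 0 32 1).map
      (fun j => ("ch" ++ PySem.Int.toStr j,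
        (PySem.List.pyRange j (PySem.List.len arry) 32).map (fun i => PySem.List.pyGetD arry i 0))) := by
    unfold LoadChan
    simp only [hstep]
    simpa using PySem.Dict.items_foldl_insert_fresh (PySem.List.pyRange 0 32 1)
      (fun j => "ch" ++ PySem.Int.toStr j)
      (fun j => (PySem.List.pyRange j (PySem.List.len arry) 32).map (fun i => PySem.List.pyGetD arry i 0))
      PySem.Dict.empty hfresh hnodup
  -- ---- B's side ----
  have hinit : ((PySem.List.pyRange 0 32 1).foldl
      (fun d j => d.insert ("ch" ++ PySem.Int.toStr j) []) PySem.Dict.empty).items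
      = (PySem.List.pyRange 0 32 1).map (fun j => ("ch" ++ PySem.Int.toStr j, ([] : List Int))) := by
    simpa using PySem.Dict.items_foldl_insert_fresh (PySem.List.pyRange 0 32 1)
      (fun j => "ch" ++ PySem.Int.toStr j) (fun _ => ([] : List Int)) PySem.Dict.empty hfresh hnodup
  set dInit : PySem.Dict String (List Int) := (PySem.List.pyRange 0 32 1).foldl
      (fun d j => d.insert ("ch" ++ PySem.Int.toStr j) []) PySem.Dict.empty with hdInit
  have hkeysInit : dInit.keys = (PySem.List.pyRange 0 32 1).map (fun j => "ch" ++ PySem.Int.toStr j) := by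
    simp only [PySem.Dict.keys, hinit, List.map_map]
    rfl
  set db : PySem.Dict String (List Int) := (PySem.List.enumerate arry).foldl
      (fun d p => d.modify ("ch" ++ PySem.Int.toStr (PySem.Int.mod p.1 32)) [] (fun l => l ++ [p.2]))
      dInit with hdb
  have hkeysB : db.keys = dInit.keys := by
    rw [hdb, PySem.Dict.keys_foldl_modify_key (PySem.List.enumerate arry)
      (fun p => "ch" ++ PySem.Int.toStr (PySem.Int.mod p.1 32)) [] (fun _ p => fun l => l ++ [p.2]) dInit]
    apply pvSet_update_of_subset
    intro x hx
    rw [List.mem_map] at hx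
    obtain ⟨p, _, hpx⟩ := hx
    rw [hkeysInit, List.mem_map]
    exact ⟨PySem.Int.mod p.1 32, pvMem32 (PySem.Int.mod_nonneg p.1 h32) (PySem.Int.mod_lt p.1 h32), hpx⟩
  have hnodupB : db.keys.Nodup := by rw [hkeysB, hkeysInit]; exact hnodup
  have hgetD : ∀ j ∈ PySem.List.pyRange 0 32 1,
      db.getD ("ch" ++ PySem.Int.toStr j) []
        = (PySem.List.pyRange j (PySem.List.len arry) 32).map (fun i => PySem.List.pyGetD arry i 0) := by
    intro j hj
    have hj' := hbounds j hj
    have hfold : db = ((PySem.List.enumerate arry).map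
        (fun p : Int × Int => ("ch" ++ PySem.Int.toStr (PySem.Int.mod p.1 32), p.2))).foldl
        (fun d q => d.modify q.1 [] (fun l => l ++ [q.2])) dInit := by
      rw [hdb, List.foldl_map]
    rw [hfold, PySem.Dict.getD_foldl_modify_append]
    have hinitD : dInit.getD ("ch" ++ PySem.Int.toStr j) [] = [] := by
      apply PySem.Dict.getD_of_mem_items
      · rw [hinit, List.mem_map]
        exact ⟨j, hj, rfl⟩
      · rw [hkeysInit]; exact hnodup
    rw [hinitD, List.nil_append, List.filter_map, List.map_map]
    have := pvStride arry hj'.1 hj'.2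
    simp only [pvKey] at this
    exact this
  -- ---- assemble ----
  have hB : LoadChan_alt arry = (PySem.List.pyRange 0 32 1).map
      (fun j => ("ch" ++ PySem.Int.toStr j, db.getD ("ch" ++ PySem.Int.toStr j) [])) := by
    show db.items = _
    rw [PySem.Dict.items_eq_map_keys db hnodupB ([] : List Int), hkeysB, hkeysInit, List.map_map]
    rfl
  rw [hA, hB]
  exact (List.map_congr_left (fun j hj => by rw [hgetD j hj])).symm
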